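-- pv_equiv track=rewrite | github.com/HongEunho/Python-Algorithm-Notes | PriorityQueue/Programmers표 편집.py | solution
-- ===== SOURCE A (Python) =====
-- import heapq
--
-- def solution(n, k, cmd):
--     answer = ''
--     left, right, delete = [], [], []
--     result = []
--
--     for i in range(n):
--         heapq.heappush(right, i)
--
--     for i in range(k):
--         heapq.heappush(left, -heapq.heappop(right))
--
--     for i in cmd:
--         if len(i) > 1:
--             tmp = i.split()
--
--             if tmp[0] == 'D':
--                 for j in range(int(tmp[1])):
--                     if right:
--                         heapq.heappush(left, -heapq.heappop(right))
--
--             elif tmp[0] == 'U':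
--                 for j in range(int(tmp[1])):
--                     if left:
--                         heapq.heappush(right, -heapq.heappop(left))
--
--         elif i == 'C':
--             delete.append(heapq.heappop(right))
--
--             if not right:
--                 heapq.heappush(right, -heapq.heappop(left))
--
--         elif i == 'Z':
--             z = delete.pop()
--
--             if z < right[0]:
--                 heapq.heappush(left, -z)
--             else:
--                 heapq.heappush(right, z)
--
--     while left:
--         result.append(-heapq.heappop(left))
--
--     while right:
--         result.append(heapq.heappop(right))
--
--     for i in range(n):
--         if i in result:
--             answer += "O"
--         else:
--             answer += "X"
--
--     return answer
-- ===== SOURCE B (Python) =====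
-- import bisect
--
-- def solution(n, k, cmd):
--     # One sorted list of surviving rows plus a cursor POSITION; moves are O(1)
--     # clamped arithmetic, delete/restore are a pop / insort, and the answer is
--     # built from a set of deleted rows (no quadratic membership scan).
--     live = list(range(n))
--     p = min(max(k, 0), len(live))
--     stack = []
--     for c in cmd:
--         if len(c) > 1:
--             parts = c.split()
--             if parts[0] == 'D':
--                 step = int(parts[1])
--                 if step > 0:
--                     p = min(p + step, len(live))
--             elif parts[0] == 'U':
--                 step = int(parts[1])
--                 if step > 0:
--                     p = max(p - step, 0)
--         elif c == 'C':
--             stack.append(live.pop(p))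
--             if p == len(live) and live:
--                 p -= 1
--         elif c == 'Z':
--             z = stack.pop()
--             if p == len(live) or z < live[p]:
--                 p += 1
--             bisect.insort_left(live, z)
--     dead = set(stack)
--     return ''.join('X' if i in dead else 'O' for i in range(n))
-- ===== Notes on version B (the rewrite author's own statement) =====
-- stated objective: faster
-- what changed: A simulates the editor with two heaps plus a final O(n^2) 'i in result' list scan; B keeps one sorted list of surviving rows with a clamped cursor position (moves become O(1) arithmetic, delete/restore a single pop/insort) and builds the answer from a set of deleted rows in O(n).
import Mathlib
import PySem

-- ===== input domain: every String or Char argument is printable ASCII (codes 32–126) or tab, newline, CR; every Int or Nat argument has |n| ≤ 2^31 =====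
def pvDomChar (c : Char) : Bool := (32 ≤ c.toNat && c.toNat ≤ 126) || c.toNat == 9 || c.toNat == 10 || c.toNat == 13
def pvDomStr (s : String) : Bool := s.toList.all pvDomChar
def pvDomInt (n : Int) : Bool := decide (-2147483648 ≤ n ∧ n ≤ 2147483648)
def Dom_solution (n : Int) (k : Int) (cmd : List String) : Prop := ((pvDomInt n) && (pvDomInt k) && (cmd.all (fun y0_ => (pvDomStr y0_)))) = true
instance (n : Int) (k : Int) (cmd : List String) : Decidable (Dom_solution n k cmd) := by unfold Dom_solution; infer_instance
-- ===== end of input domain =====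

-- B replaces A's two heaps + O(n^2) final membership scan by one sorted list with a
-- clamped cursor POSITION (O(1) moves) and a set-based O(n) answer pass.

-- ===== PORT A =====
-- heapq heap of distinct ints modelled as an ascending sorted list: heappush is a sorted
-- insert, heappop pops the head (= the minimum), heap[0] is the head — exactly the
-- observations A makes of its heaps.  hpop [] is Python's IndexError; Pre_ excludes it.
def hpush (h : List Int) (x : Int) : List Int := List.orderedInsert (· ≤ ·) x h

def hpop : List Int → Int × List Int
  | [] => (0, [])            -- heappop from an empty heap raises IndexError; Pre_ excludes
  | x :: t => (x, t)

-- body of "for j in range(int(tmp[1])): if right: heappush(left, -heappop(right))"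
def aDstep (q : List Int × List Int) : List Int × List Int :=
  match q.2 with
  | [] => q
  | m :: r' => (hpush q.1 (-m), r')

-- body of the symmetric 'U' loop
def aUstep (q : List Int × List Int) : List Int × List Int :=
  match q.1 with
  | [] => q
  | m :: l' => (l', hpush q.2 (-m))

-- body of "for i in cmd: …"; state (left, right, delete)
def aStep (s : List Int × List Int × List Int) (i : String) : List Int × List Int × List Int :=
  if PySem.Str.len i > 1 then
    match PySem.Str.split₀ i with
    | [] => s                                  -- tmp[0] raises IndexError; Pre_ excludes
    | t0 :: rest =>
      if t0 = "D" then
        match rest with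
        | [] => s                              -- tmp[1] raises IndexError; Pre_ excludes
        | t1 :: _ =>
          match PySem.Int.ofStr? t1 with
          | none => s                          -- int() raises ValueError; Pre_ excludes
          | some x =>
            let lr := (PySem.List.pyRange 0 x 1).foldl (fun q _ => aDstep q) (s.1, s.2.1)
            (lr.1, lr.2, s.2.2)
      else if t0 = "U" then
        match rest with
        | [] => s                              -- tmp[1] raises IndexError; Pre_ excludes
        | t1 :: _ =>
          match PySem.Int.ofStr? t1 with
          | none => s                          -- int() raises ValueError; Pre_ excludes
          | some x =>
            let lr := (PySem.List.pyRange 0 x 1).foldl (fun q _ => aUstep q) (s.1, s.2.1)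
            (lr.1, lr.2, s.2.2)
      else s
  else if i = "C" then
    let mr := hpop s.2.1
    let del' := s.2.2 ++ [mr.1]
    if mr.2 = [] then
      let ml := hpop s.1
      (ml.2, hpush mr.2 (-ml.1), del')
    else (s.1, mr.2, del')
  else if i = "Z" then
    match PySem.List.pop? s.2.2 with
    | none => s                                -- delete.pop() raises IndexError; Pre_ excludes
    | some (z, del') =>
      match s.2.1 with
      | [] => s                                -- right[0] raises IndexError; Pre_ excludes
      | r0 :: _ =>
        if z < r0 then (hpush s.1 (-z), s.2.1, del')
        else (s.1, hpush s.2.1 z, del')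
  else s

-- "while left: result.append(-heappop(left))"
def drainL : List Int → List Int
  | [] => []
  | x :: t => (-x) :: drainL t

-- "while right: result.append(heappop(right))"
def drainR : List Int → List Int
  | [] => []
  | x :: t => x :: drainR t

def solution (n : Int) (k : Int) (cmd : List String) : String :=
  let right0 := (PySem.List.pyRange 0 n 1).foldl (fun h i => hpush h i) []
  let lr0 := (PySem.List.pyRange 0 k 1).foldl
      (fun (q : List Int × List Int) _ => let m := hpop q.2; (hpush q.1 (-m.1), m.2))
      (([] : List Int), right0)
  let st := cmd.foldl aStep (lr0.1, lr0.2, ([] : List Int))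
  let result := drainL st.1 ++ drainR st.2.1
  (PySem.List.pyRange 0 n 1).foldl
    (fun ans i => ans ++ (if result.contains i then "O" else "X")) ""

-- ===== PORT B =====
-- body of B's command loop; state (live, p, stack): live = surviving rows ascending,
-- p = cursor position in live (len live = just past the end), stack = deleted rows (LIFO)
def bStep (s : List Int × Int × List Int) (c : String) : List Int × Int × List Int :=
  if PySem.Str.len c > 1 then
    match PySem.Str.split₀ c with
    | [] => s                                  -- parts[0] raises IndexError; Pre_ excludes
    | p0 :: rest =>
      if p0 = "D" then
        match rest with
        | [] => s                              -- parts[1] raises IndexError; Pre_ excludes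
        | p1 :: _ =>
          match PySem.Int.ofStr? p1 with
          | none => s                          -- int() raises ValueError; Pre_ excludes
          | some step =>
            if step > 0 then (s.1, min (s.2.1 + step) (s.1.length : Int), s.2.2) else s
      else if p0 = "U" then
        match rest with
        | [] => s                              -- parts[1] raises IndexError; Pre_ excludes
        | p1 :: _ =>
          match PySem.Int.ofStr? p1 with
          | none => s                          -- int() raises ValueError; Pre_ excludes
          | some step =>
            if step > 0 then (s.1, max (s.2.1 - step) 0, s.2.2) else s
      else s
  else if c = "C" then
    match PySem.List.pop? s.1 s.2.1 with
    | none => s                                -- live.pop(p) raises IndexError; Pre_ excludes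
    | some (z, live') =>
      if s.2.1 = (live'.length : Int) ∧ live' ≠ [] then (live', s.2.1 - 1, s.2.2 ++ [z])
      else (live', s.2.1, s.2.2 ++ [z])
  else if c = "Z" then
    match PySem.List.pop? s.2.2 with
    | none => s                                -- stack.pop() raises IndexError; Pre_ excludes
    | some (z, stack') =>
      let p' := if s.2.1 = (s.1.length : Int) ∨ z < PySem.List.pyGetD s.1 s.2.1 0
                then s.2.1 + 1 else s.2.1
      (List.orderedInsert (· ≤ ·) z s.1, p', stack')   -- bisect.insort_left
  else s

def solution_alt (n : Int) (k : Int) (cmd : List String) : String :=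
  let live0 := PySem.List.pyRange 0 n 1
  let st := cmd.foldl bStep (live0, min (max k 0) (live0.length : Int), ([] : List Int))
  let dead := PySem.Set.ofList st.2.2
  PySem.Str.join "" ((PySem.List.pyRange 0 n 1).map (fun i => if dead.contains i then "X" else "O"))

-- ===== PRECONDITION & SPEC =====
-- Validity automaton for Pre_: abstract state = (cursor ROW c, deleted stack S), with
-- c = max n 0 meaning "past the end".  It only decides whether A raises; it is neither
-- port's algorithm (A juggles two heaps, B does position arithmetic on one list).
def liveL (n' : Int) (S : List Int) : List Int :=
  (PySem.List.pyRange 0 n' 1).filter (fun j => decide (j ∉ S))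

def dnx (n' : Int) (live : List Int) (c : Int) : Int :=
  match live.filter (fun j => decide (c < j)) with
  | [] => n'
  | j :: _ => j

def upv (live : List Int) (c : Int) : Option Int :=
  (live.filter (fun j => decide (j < c))).getLast?

def dIter (n' : Int) (live : List Int) : Nat → Int → Int
  | 0, c => c
  | m + 1, c => dIter n' live m (dnx n' live c)

def uIter (live : List Int) : Nat → Int → Int
  | 0, c => c
  | m + 1, c =>
    match upv live c with
    | none => c
    | some c2 => uIter live m c2

-- the cursor saturates after at most n' steps, so capping the step count keeps
-- deciding Pre_ linear in n (a lemma below bridges to A's exact x iterations)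
def moveD (n' : Int) (live : List Int) (c x : Int) : Int :=
  dIter n' live (min (max x 0) (n' + 1)).toNat c

def moveU (n' : Int) (live : List Int) (c x : Int) : Int :=
  uIter live (min (max x 0) (n' + 1)).toNat c

def mStep (n' : Int) (s : Int × List Int) (i : String) : Option (Int × List Int) :=
  if PySem.Str.len i > 1 then
    match PySem.Str.split₀ i with
    | [] => none
    | t0 :: rest =>
      if t0 = "D" ∨ t0 = "U" then
        match rest with
        | [] => none
        | t1 :: _ =>
          match PySem.Int.ofStr? t1 with
          | none => none
          | some x =>
            some (if t0 = "D" then (moveD n' (liveL n' s.2) s.1 x, s.2)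
                  else (moveU n' (liveL n' s.2) s.1 x, s.2))
      else some s
  else if i = "C" then
    if s.1 = n' ∨ (liveL n' s.2).length < 2 then none
    else some ((match (liveL n' s.2).filter (fun j => decide (s.1 < j)) with
                | j :: _ => j
                | [] => ((upv (liveL n' s.2) s.1).getD n')), s.2 ++ [s.1])
  else if i = "Z" then
    if s.2 = [] ∨ s.1 = n' then none else some (s.1, s.2.dropLast)
  else some s

def mRun (n : Int) (k : Int) (cmd : List String) : Option (Int × List Int) :=
  cmd.foldl (fun o i => o.bind (fun s => mStep (max n 0) s i))
    (some (min (max k 0) (max n 0), ([] : List Int)))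

-- Pre_ holds exactly when Python A returns: the initial cursor k fits the table
-- (k ≤ max n 0; A pops the heap k times) and no command is malformed, deletes from an
-- empty/singleton remainder, restores with an empty stack, or touches right[0] while the
-- cursor is past the end.
def Pre_solution (n : Int) (k : Int) (cmd : List String) : Prop :=
  k ≤ max n 0 ∧ (mRun n k cmd).isSome = true
instance (n : Int) (k : Int) (cmd : List String) : Decidable (Pre_solution n k cmd) := by
  unfold Pre_solution; infer_instance

def pvWitness_solution : Int × Int × List String := (3, 0, ["D 1", "C", "Z", "U 1"])

def Spec_solution (n : Int) (k : Int) (cmd : List String) (out : String) : Prop := out = solution_alt n k cmd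
instance (n : Int) (k : Int) (cmd : List String) (out : String) : Decidable (Spec_solution n k cmd out) := by unfold Spec_solution; infer_instance

-- ===== CLAIM (what is proved, stated in full; the proofs are below) =====
def Claim_equal_solution : Prop := ∀ (n : Int) (k : Int) (cmd : List String), Dom_solution n k cmd → Pre_solution n k cmd → Spec_solution n k cmd (solution n k cmd)

-- ===== LEMMAS AND PROOFS =====

-- abbreviations for the proofs: rows below / at-or-after / strictly after the cursor
def fLT (live : List Int) (c : Int) : List Int := live.filter (fun j => decide (j < c))
def fGE (live : List Int) (c : Int) : List Int := live.filter (fun j => decide (c ≤ j))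
def fGT (live : List Int) (c : Int) : List Int := live.filter (fun j => decide (c < j))
def negrev (l : List Int) : List Int := (l.map (fun z => -z)).reverse
def Valid (n' : Int) (live : List Int) (c : Int) : Prop := c ∈ live ∨ c = n'

-- the simulation relation: machine state (c, S) determines both ports' states
def SimRel (n' c : Int) (S : List Int) (a : List Int × List Int × List Int)
    (b : List Int × Int × List Int) : Prop :=
  (S.Nodup ∧ ∀ z ∈ S, 0 ≤ z ∧ z < n') ∧
  Valid n' (liveL n' S) c ∧
  b.1 = liveL n' S ∧ b.2.2 = S ∧ a.2.2 = S ∧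
  a.1 = negrev (fLT (liveL n' S) c) ∧
  a.2.1 = fGE (liveL n' S) c ∧
  b.2.1 = (((fLT (liveL n' S) c).length : Int))

theorem liveL_pairwise (n' : Int) (S : List Int) : (liveL n' S).Pairwise (· < ·) := by
  exact List.Pairwise.filter _ (PySem.List.pairwise_lt_pyRange_one 0 n')

theorem mem_liveL (n' : Int) (S : List Int) (j : Int) :
    j ∈ liveL n' S ↔ 0 ≤ j ∧ j < n' ∧ j ∉ S := by
  simp [liveL, List.mem_filter, PySem.List.mem_pyRange_one, and_assoc]

theorem liveL_length_le (n' : Int) (S : List Int) : ((liveL n' S).length : Int) ≤ max n' 0 := by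
  have h1 := List.length_filter_le (fun j => decide (j ∉ S)) (PySem.List.pyRange 0 n' 1)
  have h2 := PySem.List.length_pyRange_one 0 n'
  simp only [liveL]
  omega

theorem sorted_split (l : List Int) (c : Int) (h : l.Pairwise (· < ·)) :
    fLT l c ++ fGE l c = l := by
  induction l with
  | nil => simp [fLT, fGE]
  | cons x xs ih =>
    rw [List.pairwise_cons] at h
    by_cases hx : x < c
    · have hcx : ¬ (c ≤ x) := by omega
      simp only [fLT, fGE, List.filter_cons] at ih ⊢
      simp [hx, hcx, ih h.2]
    · have h1 : xs.filter (fun j => decide (j < c)) = [] := by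
        rw [List.filter_eq_nil_iff]; intro j hj; have := h.1 j hj; simp; omega
      have h2 : xs.filter (fun j => decide (c ≤ j)) = xs := by
        rw [List.filter_eq_self]; intro j hj; have := h.1 j hj; simp; omega
      simp only [fLT, fGE, List.filter_cons]
      simp [hx, (by omega : c ≤ x), h1, h2]

theorem filter_ge_cons (l : List Int) (c : Int) (h : l.Pairwise (· < ·)) (hc : c ∈ l) :
    fGE l c = c :: fGT l c := by
  induction l with
  | nil => cases hc
  | cons x xs ih =>
    rw [List.pairwise_cons] at h
    rcases List.mem_cons.mp hc with rfl | hc2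
    · simp only [fGE, fGT, List.filter_cons]
      rw [if_pos (by simp), if_neg (by simp)]
      congr 1
      exact List.filter_congr (fun j hj => by have := h.1 j hj; simp; omega)
    · have hxc : x < c := h.1 c hc2
      simp only [fGE, fGT, List.filter_cons] at ih ⊢
      rw [if_neg (by simp; omega), if_neg (by simp; omega), ih h.2 hc2]

theorem oins_front (a : Int) (l : List Int) (h : ∀ y ∈ l, a ≤ y) :
    List.orderedInsert (· ≤ ·) a l = a :: l := by
  cases l with
  | nil => rfl
  | cons b t => simp [List.orderedInsert, h b (List.mem_cons_self)]

theorem oins_back (a : Int) (l : List Int) (h : ∀ y ∈ l, ¬ a ≤ y) :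
    List.orderedInsert (· ≤ ·) a l = l ++ [a] := by
  induction l with
  | nil => rfl
  | cons x xs ih =>
    rw [List.orderedInsert, if_neg (by simpa using h x List.mem_cons_self)]
    rw [ih (fun y hy => h y (List.mem_cons_of_mem x hy))]
    rfl

theorem oins_eq (a : Int) (l t : List Int) (hl : l.Pairwise (· < ·)) (ht : t.Pairwise (· < ·))
    (ha : a ∉ l) (hm : ∀ y, y ∈ t ↔ y = a ∨ y ∈ l) :
    List.orderedInsert (· ≤ ·) a l = t := by
  have hle : (List.orderedInsert (· ≤ ·) a l).Pairwise (· ≤ ·) :=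
    List.Pairwise.orderedInsert a l (hl.imp le_of_lt)
  have hperm := List.perm_orderedInsert (· ≤ ·) a l
  have hnd : (List.orderedInsert (· ≤ ·) a l).Nodup :=
    hperm.nodup_iff.mpr (List.nodup_cons.mpr ⟨ha, hl.imp ne_of_lt⟩)
  have hstrict : (List.orderedInsert (· ≤ ·) a l).SortedLT :=
    List.SortedLE.sortedLT_of_nodup hle.sortedLE hnd
  exact List.SortedLT.eq_of_mem_iff hstrict ht.sortedLT
    (fun y => by rw [List.mem_orderedInsert]; exact (hm y).symm)

theorem negrev_pairwise (l : List Int) (h : l.Pairwise (· < ·)) :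
    (negrev l).Pairwise (· < ·) := by
  simp only [negrev, List.pairwise_reverse, List.pairwise_map]
  exact h.imp (fun hab => by omega)

theorem mem_negrev (l : List Int) (y : Int) : y ∈ negrev l ↔ -y ∈ l := by
  simp only [negrev, List.mem_reverse, List.mem_map]
  constructor
  · rintro ⟨x, hx, rfl⟩; simpa using hx
  · intro h; exact ⟨-y, h, by ring⟩

theorem foldl_ignore {α : Type} (f : α → α) (l : List Int) (init : α) :
    l.foldl (fun q _ => f q) init = f^[l.length] init := by
  induction l generalizing init with
  | nil => rfl
  | cons x xs ih => simp [List.foldl_cons, ih, Function.iterate_succ_apply]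

theorem drainL_eq (l : List Int) : drainL l = l.map (fun z => -z) := by
  induction l with
  | nil => rfl
  | cons x xs ih => simp [drainL, ih]

theorem drainR_eq (l : List Int) : drainR l = l := by
  induction l with
  | nil => rfl
  | cons x xs ih => simp [drainR, ih]

-- decomposition of the live list around a live cursor
theorem live_decomp (l : List Int) (c : Int) (hp : l.Pairwise (· < ·)) (hc : c ∈ l) :
    l = fLT l c ++ c :: fGT l c := by
  conv_lhs => rw [← sorted_split l c hp]
  rw [filter_ge_cons l c hp hc]

theorem fLT_length_lt (l : List Int) (c : Int) (hp : l.Pairwise (· < ·)) (hc : c ∈ l) :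
    (fLT l c).length < l.length := by
  have hd := live_decomp l c hp hc
  have : l.length = (fLT l c ++ c :: fGT l c).length := by rw [← hd]
  simp at this
  omega

theorem cursor_getElem? (l : List Int) (c : Int) (hp : l.Pairwise (· < ·)) (hc : c ∈ l) :
    l[(fLT l c).length]? = some c := by
  have hd := live_decomp l c hp hc
  have h2 : l[(fLT l c).length]? = (fLT l c ++ c :: fGT l c)[(fLT l c).length]? := by
    rw [← hd]
  rw [h2, List.getElem?_append_right (le_refl _)]
  simp

-- sentinel facts for live = liveL n' S
theorem fGE_sentinel (n' : Int) (S : List Int) : fGE (liveL n' S) n' = [] := by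
  rw [fGE, List.filter_eq_nil_iff]
  intro j hj; have := (mem_liveL n' S j).mp hj; simp; omega

theorem fLT_sentinel (n' : Int) (S : List Int) : fLT (liveL n' S) n' = liveL n' S := by
  rw [fLT, List.filter_eq_self]
  intro j hj; have := (mem_liveL n' S j).mp hj; simp; omega

theorem fGT_sentinel (n' : Int) (S : List Int) : fGT (liveL n' S) n' = [] := by
  rw [fGT, List.filter_eq_nil_iff]
  intro j hj; have := (mem_liveL n' S j).mp hj; simp; omega

theorem dnx_sentinel (n' : Int) (S : List Int) : dnx n' (liveL n' S) n' = n' := by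
  have h : (liveL n' S).filter (fun j => decide (n' < j)) = [] := by
    simpa [fGT] using fGT_sentinel n' S
  rw [dnx, h]

-- one 'D' step of A from a live cursor
theorem D_one (n' : Int) (S : List Int) (c : Int) (hc : c ∈ liveL n' S) :
    aDstep (negrev (fLT (liveL n' S) c), fGE (liveL n' S) c)
      = (negrev (fLT (liveL n' S) (dnx n' (liveL n' S) c)), fGE (liveL n' S) (dnx n' (liveL n' S) c))
    ∧ Valid n' (liveL n' S) (dnx n' (liveL n' S) c)
    ∧ fLT (liveL n' S) (dnx n' (liveL n' S) c) = fLT (liveL n' S) c ++ [c]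
    ∧ fGE (liveL n' S) (dnx n' (liveL n' S) c) = fGT (liveL n' S) c := by
  have hp := liveL_pairwise n' S
  have hge := filter_ge_cons (liveL n' S) c hp hc
  have hpop : ∀ y ∈ negrev (fLT (liveL n' S) c), -c ≤ y := by
    intro y hy
    have : -y ∈ fLT (liveL n' S) c := (mem_negrev _ y).mp hy
    have := List.of_mem_filter this
    simp at this; omega
  have hpushf : hpush (negrev (fLT (liveL n' S) c)) (-c) = negrev (fLT (liveL n' S) c ++ [c]) := by
    rw [hpush, oins_front _ _ hpop]
    simp [negrev]
  rcases h3 : fGT (liveL n' S) c with _ | ⟨j, tl⟩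
  · have h3' : (liveL n' S).filter (fun j => decide (c < j)) = [] := h3
    have hdnx : dnx n' (liveL n' S) c = n' := by rw [dnx, h3']
    have hdec := live_decomp (liveL n' S) c hp hc
    rw [h3] at hdec
    have hlt : fLT (liveL n' S) n' = fLT (liveL n' S) c ++ [c] := by
      rw [fLT_sentinel]; exact hdec
    have hstep : aDstep (negrev (fLT (liveL n' S) c), fGE (liveL n' S) c)
        = (hpush (negrev (fLT (liveL n' S) c)) (-c), fGT (liveL n' S) c) := by
      rw [hge]; rfl
    rw [hdnx]
    refine ⟨?_, Or.inr rfl, hlt, by simp [fGE_sentinel, h3]⟩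
    rw [hstep, hpushf, hlt, fGE_sentinel, h3]
  · have h3' : (liveL n' S).filter (fun j => decide (c < j)) = j :: tl := h3
    have hdnx : dnx n' (liveL n' S) c = j := by rw [dnx, h3']
    have hjmem : j ∈ fGT (liveL n' S) c := by rw [h3]; exact List.mem_cons_self
    have hjlive : j ∈ liveL n' S := List.mem_of_mem_filter hjmem
    have hcj : c < j := by have := List.of_mem_filter hjmem; simpa using this
    have hmin : ∀ y ∈ liveL n' S, c < y → j ≤ y := by
      intro y hy hcy
      have hyf : y ∈ fGT (liveL n' S) c := List.mem_filter.mpr ⟨hy, by simpa using hcy⟩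
      rw [h3] at hyf
      rcases List.mem_cons.mp hyf with rfl | hytl
      · exact le_refl _
      · have hpf : (fGT (liveL n' S) c).Pairwise (· < ·) := List.Pairwise.filter _ hp
        rw [h3, List.pairwise_cons] at hpf
        exact le_of_lt (hpf.1 y hytl)
    have hflt : fLT (liveL n' S) j = fLT (liveL n' S) c ++ [c] := by
      apply List.SortedLT.eq_of_mem_iff
        (List.Pairwise.sortedLT (List.Pairwise.filter _ hp))
        (List.Pairwise.sortedLT ?_)
      · intro y
        simp only [fLT, List.mem_filter, List.mem_append, List.mem_singleton,
          decide_eq_true_eq]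
        constructor
        · rintro ⟨hy, hyj⟩
          by_cases hyc : y < c
          · exact Or.inl ⟨hy, by simpa using hyc⟩
          · right
            rcases lt_trichotomy y c with h | h | h
            · omega
            · exact h
            · exact absurd (hmin y hy h) (by omega)
        · rintro (⟨hy, hyc⟩ | rfl)
          · exact ⟨hy, by omega⟩
          · exact ⟨hc, by omega⟩
      · rw [List.pairwise_append]
        refine ⟨List.Pairwise.filter _ hp, List.pairwise_singleton _ _, ?_⟩
        intro y hy b hb
        rw [List.mem_singleton] at hb; subst hb
        have := List.of_mem_filter hy; simp at this; omega
    have hfge : fGT (liveL n' S) c = fGE (liveL n' S) j := by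
      rw [fGT, fGE]
      apply List.filter_congr
      intro y hy
      simp only [decide_eq_decide]
      exact ⟨fun h => hmin y hy h, fun h => lt_of_lt_of_le hcj h⟩
    have hstep : aDstep (negrev (fLT (liveL n' S) c), fGE (liveL n' S) c)
        = (hpush (negrev (fLT (liveL n' S) c)) (-c), fGT (liveL n' S) c) := by
      rw [hge]; rfl
    refine ⟨?_, Or.inl (hdnx ▸ hjlive), hdnx ▸ hflt, by rw [hdnx, ← h3]; exact hfge.symm⟩
    rw [hstep, hpushf, hdnx, hflt, ← hfge]

def ustp (live : List Int) (c : Int) : Int :=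
  match upv live c with
  | none => c
  | some m => m

-- one 'U' step of A
theorem U_one (n' : Int) (S : List Int) (c : Int) (hv : Valid n' (liveL n' S) c) :
    aUstep (negrev (fLT (liveL n' S) c), fGE (liveL n' S) c)
      = (negrev (fLT (liveL n' S) (ustp (liveL n' S) c)), fGE (liveL n' S) (ustp (liveL n' S) c))
    ∧ Valid n' (liveL n' S) (ustp (liveL n' S) c)
    ∧ fLT (liveL n' S) (ustp (liveL n' S) c) = (fLT (liveL n' S) c).dropLast := by
  have hp := liveL_pairwise n' S
  rcases List.eq_nil_or_concat (fLT (liveL n' S) c) with h3 | ⟨g, m, h3⟩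
  · have hupv : upv (liveL n' S) c = none := by
      have h3' : (liveL n' S).filter (fun j => decide (j < c)) = [] := h3
      rw [upv, h3']; rfl
    have hust : ustp (liveL n' S) c = c := by rw [ustp, hupv]
    have hstep : aUstep (negrev (fLT (liveL n' S) c), fGE (liveL n' S) c)
        = (negrev (fLT (liveL n' S) c), fGE (liveL n' S) c) := by
      rw [h3]; rfl
    rw [hust]
    exact ⟨hstep, hv, by rw [h3]; rfl⟩
  · rw [List.concat_eq_append] at h3
    have hupv : upv (liveL n' S) c = some m := by
      have h3' : (liveL n' S).filter (fun j => decide (j < c)) = g ++ [m] := h3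
      rw [upv, h3', List.getLast?_concat]
    have hust : ustp (liveL n' S) c = m := by rw [ustp, hupv]
    have hmmem : m ∈ fLT (liveL n' S) c := by rw [h3]; simp
    have hmlive : m ∈ liveL n' S := List.mem_of_mem_filter hmmem
    have hmc : m < c := by have := List.of_mem_filter hmmem; simpa using this
    have hpf : (fLT (liveL n' S) c).Pairwise (· < ·) := List.Pairwise.filter _ hp
    have hgm : ∀ y ∈ g, y < m := by
      intro y hy
      rw [h3, List.pairwise_append] at hpf
      exact hpf.2.2 y hy m (List.mem_singleton_self m)
    have hmax : ∀ y ∈ liveL n' S, y < c → y ≤ m := by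
      intro y hy hyc
      have hyf : y ∈ fLT (liveL n' S) c := List.mem_filter.mpr ⟨hy, by simpa using hyc⟩
      rw [h3] at hyf
      rcases List.mem_append.mp hyf with hyg | hym
      · exact le_of_lt (hgm y hyg)
      · rw [List.mem_singleton] at hym; omega
    have hflt : fLT (liveL n' S) m = g := by
      apply List.SortedLT.eq_of_mem_iff
        (List.Pairwise.sortedLT (List.Pairwise.filter _ hp))
        (List.Pairwise.sortedLT ?_)
      · intro y
        simp only [fLT, List.mem_filter, decide_eq_true_eq]
        constructor
        · rintro ⟨hy, hym⟩
          have hyc : y < c := lt_trans hym hmc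
          have : y ∈ g ++ [m] := by
            rw [← h3]; exact List.mem_filter.mpr ⟨hy, by simpa using hyc⟩
          rcases List.mem_append.mp this with h | h
          · exact h
          · rw [List.mem_singleton] at h; omega
        · intro hyg
          have hym := hgm y hyg
          have : y ∈ fLT (liveL n' S) c := by rw [h3]; exact List.mem_append_left _ hyg
          exact ⟨List.mem_of_mem_filter this, by simpa using hym⟩
      · rw [h3, List.pairwise_append] at hpf
        exact hpf.1
    have hgt : fGT (liveL n' S) m = fGE (liveL n' S) c := by
      rw [fGT, fGE]
      apply List.filter_congr
      intro y hy
      simp only [decide_eq_decide]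
      constructor
      · intro hmy
        by_contra hyc
        exact absurd (hmax y hy (by omega)) (by omega)
      · intro hcy; omega
    have hge : fGE (liveL n' S) m = m :: fGE (liveL n' S) c := by
      rw [filter_ge_cons _ m hp hmlive, hgt]
    have hleft : negrev (fLT (liveL n' S) c) = -m :: negrev g := by
      rw [h3]; simp [negrev]
    have hpush2 : hpush (fGE (liveL n' S) c) (- -m) = m :: fGE (liveL n' S) c := by
      rw [hpush, neg_neg]
      apply oins_front
      intro y hy
      have := List.of_mem_filter hy; simp at this; omega
    have hstep : aUstep (negrev (fLT (liveL n' S) c), fGE (liveL n' S) c)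
        = (negrev g, hpush (fGE (liveL n' S) c) (- -m)) := by
      rw [hleft]; rfl
    rw [hust]
    refine ⟨?_, Or.inl hmlive, by rw [hflt, h3]; simp⟩
    rw [hstep, hpush2, hflt, hge]

theorem uIter_fix (live : List Int) (c : Int) (h : upv live c = none) :
    ∀ m, uIter live m c = c := by
  intro m
  induction m with
  | zero => rfl
  | succ m ih => rw [uIter, h]

theorem uIter_succ (live : List Int) (c : Int) (m : Nat) :
    uIter live (m + 1) c = uIter live m (ustp live c) := by
  rcases h : upv live c with _ | m2
  · rw [uIter, h, ustp, h, uIter_fix live c h m]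
  · rw [uIter, h, ustp, h]

theorem D_iter (n' : Int) (S : List Int) :
    ∀ (m : Nat) (c : Int), Valid n' (liveL n' S) c →
      aDstep^[m] (negrev (fLT (liveL n' S) c), fGE (liveL n' S) c)
        = (negrev (fLT (liveL n' S) (dIter n' (liveL n' S) m c)), fGE (liveL n' S) (dIter n' (liveL n' S) m c))
      ∧ Valid n' (liveL n' S) (dIter n' (liveL n' S) m c) := by
  intro m
  induction m with
  | zero => exact fun c hv => ⟨rfl, hv⟩
  | succ m ih =>
    intro c hv
    rcases hv with hc | hs
    · obtain ⟨h1, h2, _, _⟩ := D_one n' S c hc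
      rw [Function.iterate_succ_apply, h1]
      simpa only [dIter] using ih (dnx n' (liveL n' S) c) h2
    · rw [hs]
      have hfix : aDstep (negrev (fLT (liveL n' S) n'), fGE (liveL n' S) n')
          = (negrev (fLT (liveL n' S) n'), fGE (liveL n' S) n') := by
        rw [fGE_sentinel]; rfl
      rw [Function.iterate_succ_apply, hfix]
      simpa only [dIter, dnx_sentinel] using ih n' (Or.inr rfl)

theorem D_len (n' : Int) (S : List Int) :
    ∀ (m : Nat) (c : Int), Valid n' (liveL n' S) c →
      (fLT (liveL n' S) (dIter n' (liveL n' S) m c)).length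
        = min ((fLT (liveL n' S) c).length + m) (liveL n' S).length := by
  intro m
  induction m with
  | zero =>
    intro c hv
    have hle : (fLT (liveL n' S) c).length ≤ (liveL n' S).length :=
      List.length_filter_le _ _
    simp only [dIter, Nat.add_zero]
    omega
  | succ m ih =>
    intro c hv
    rcases hv with hc | hs
    · obtain ⟨_, hval, hflt, _⟩ := D_one n' S c hc
      have hlen : (fLT (liveL n' S) (dnx n' (liveL n' S) c)).length
          = (fLT (liveL n' S) c).length + 1 := by rw [hflt]; simp
      have hlt := fLT_length_lt (liveL n' S) c (liveL_pairwise n' S) hc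
      simp only [dIter]
      rw [ih _ hval, hlen]
      omega
    · rw [hs]
      have hsent := fLT_sentinel n' S
      simp only [dIter, dnx_sentinel]
      rw [ih n' (Or.inr rfl), hsent]
      omega

theorem U_iter (n' : Int) (S : List Int) :
    ∀ (m : Nat) (c : Int), Valid n' (liveL n' S) c →
      aUstep^[m] (negrev (fLT (liveL n' S) c), fGE (liveL n' S) c)
        = (negrev (fLT (liveL n' S) (uIter (liveL n' S) m c)), fGE (liveL n' S) (uIter (liveL n' S) m c))
      ∧ Valid n' (liveL n' S) (uIter (liveL n' S) m c) := by
  intro m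
  induction m with
  | zero => exact fun c hv => ⟨rfl, hv⟩
  | succ m ih =>
    intro c hv
    obtain ⟨h1, h2, _⟩ := U_one n' S c hv
    rw [Function.iterate_succ_apply, h1, uIter_succ]
    exact ih (ustp (liveL n' S) c) h2

theorem U_len (n' : Int) (S : List Int) :
    ∀ (m : Nat) (c : Int), Valid n' (liveL n' S) c →
      ((fLT (liveL n' S) (uIter (liveL n' S) m c)).length : Int)
        = max (((fLT (liveL n' S) c).length : Int) - m) 0 := by
  intro m
  induction m with
  | zero => intro c hv; simp [uIter]
  | succ m ih =>
    intro c hv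
    obtain ⟨_, hval, hflt⟩ := U_one n' S c hv
    by_cases h0 : fLT (liveL n' S) c = []
    · have hupv : upv (liveL n' S) c = none := by
        have h0' : (liveL n' S).filter (fun j => decide (j < c)) = [] := h0
        rw [upv, h0']; rfl
      rw [uIter_fix _ _ hupv, h0]
      simp
    · have hpos := List.length_pos_of_ne_nil h0
      rw [uIter_succ, ih _ hval, hflt, List.length_dropLast]
      push_cast
      omega

-- saturation: beyond (fGE …).length steps, dIter is constant (bridges A's exact x
-- iterations with the capped moveD of the machine); same for uIter with fLT
theorem dIter_sat (n' : Int) (S : List Int) :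
    ∀ (m1 m2 : Nat) (c : Int), Valid n' (liveL n' S) c →
      (fGE (liveL n' S) c).length ≤ m1 → m1 ≤ m2 →
      dIter n' (liveL n' S) m2 c = dIter n' (liveL n' S) m1 c := by
  have sat1 : ∀ (m : Nat) (c : Int), Valid n' (liveL n' S) c →
      (fGE (liveL n' S) c).length ≤ m →
      dIter n' (liveL n' S) (m + 1) c = dIter n' (liveL n' S) m c := by
    intro m
    induction m with
    | zero =>
      intro c hv hle
      rcases hv with hc | hs
      · rw [filter_ge_cons _ c (liveL_pairwise n' S) hc] at hle
        simp at hle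
      · rw [hs]
        simp only [dIter, dnx_sentinel]
    | succ m ih =>
      intro c hv hle
      rcases hv with hc | hs
      · obtain ⟨_, hval, _, hge⟩ := D_one n' S c hc
        have hcons : (fGE (liveL n' S) c).length = (fGT (liveL n' S) c).length + 1 := by
          rw [filter_ge_cons _ c (liveL_pairwise n' S) hc]; simp
        simp only [dIter]
        exact ih _ hval (by rw [hge]; omega)
      · rw [hs]
        simp only [dIter, dnx_sentinel]
  intro m1 m2 c hv h1 h2
  induction m2, h2 using Nat.le_induction with
  | base => rfl
  | succ m2 hm ih => rw [sat1 m2 c hv (le_trans h1 hm), ih]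

theorem uIter_sat (n' : Int) (S : List Int) :
    ∀ (m1 m2 : Nat) (c : Int), Valid n' (liveL n' S) c →
      (fLT (liveL n' S) c).length ≤ m1 → m1 ≤ m2 →
      uIter (liveL n' S) m2 c = uIter (liveL n' S) m1 c := by
  have sat1 : ∀ (m : Nat) (c : Int), Valid n' (liveL n' S) c →
      (fLT (liveL n' S) c).length ≤ m →
      uIter (liveL n' S) (m + 1) c = uIter (liveL n' S) m c := by
    intro m
    induction m with
    | zero =>
      intro c hv hle
      have h0 : fLT (liveL n' S) c = [] := List.eq_nil_of_length_eq_zero (by omega)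
      have hupv : upv (liveL n' S) c = none := by
        have h0' : (liveL n' S).filter (fun j => decide (j < c)) = [] := h0
        rw [upv, h0']; rfl
      rw [uIter_fix _ _ hupv, uIter_fix _ _ hupv]
    | succ m ih =>
      intro c hv hle
      obtain ⟨_, hval, hflt⟩ := U_one n' S c hv
      conv_lhs => rw [uIter_succ]
      conv_rhs => rw [uIter_succ]
      refine ih _ hval ?_
      rw [hflt, List.length_dropLast]
      omega
  intro m1 m2 c hv h1 h2
  induction m2, h2 using Nat.le_induction with
  | base => rfl
  | succ m2 hm ih => rw [sat1 m2 c hv (le_trans h1 hm), ih]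

theorem moveD_eq (n' : Int) (S : List Int) (c x : Int) (hn : 0 ≤ n')
    (hv : Valid n' (liveL n' S) c) :
    moveD n' (liveL n' S) c x = dIter n' (liveL n' S) x.toNat c := by
  rw [moveD]
  by_cases hx : x ≤ n' + 1
  · congr 1
    omega
  · have h1 := List.length_filter_le (fun j => decide (c ≤ j)) (liveL n' S)
    have h2 := liveL_length_le n' S
    have hlen : (fGE (liveL n' S) c).length ≤ (n' + 1).toNat := by
      have h1' : (fGE (liveL n' S) c).length ≤ (liveL n' S).length := h1
      omega
    have hcap : (min (max x 0) (n' + 1)).toNat = (n' + 1).toNat := by omega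
    rw [hcap, dIter_sat n' S (n' + 1).toNat x.toNat c hv hlen (by omega)]

theorem moveU_eq (n' : Int) (S : List Int) (c x : Int) (hn : 0 ≤ n')
    (hv : Valid n' (liveL n' S) c) :
    moveU n' (liveL n' S) c x = uIter (liveL n' S) x.toNat c := by
  rw [moveU]
  by_cases hx : x ≤ n' + 1
  · congr 1
    omega
  · have h1 := List.length_filter_le (fun j => decide (j < c)) (liveL n' S)
    have h2 := liveL_length_le n' S
    have hlen : (fLT (liveL n' S) c).length ≤ (n' + 1).toNat := by
      have h1' : (fLT (liveL n' S) c).length ≤ (liveL n' S).length := h1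
      omega
    have hcap : (min (max x 0) (n' + 1)).toNat = (n' + 1).toNat := by omega
    rw [hcap, uIter_sat n' S (n' + 1).toNat x.toNat c hv hlen (by omega)]

theorem sim_D (n' c : Int) (S : List Int) (a : List Int × List Int × List Int)
    (b : List Int × Int × List Int) (hn : 0 ≤ n') (hR : SimRel n' c S a b) (x : Int) :
    SimRel n' (moveD n' (liveL n' S) c x) S
      (((PySem.List.pyRange 0 x 1).foldl (fun q _ => aDstep q) (a.1, a.2.1)).1,
       ((PySem.List.pyRange 0 x 1).foldl (fun q _ => aDstep q) (a.1, a.2.1)).2, a.2.2)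
      (if x > 0 then (b.1, min (b.2.1 + x) ((b.1.length : Int)), b.2.2) else b) := by
  obtain ⟨hS, hv, hb1, hb2, ha2, ha1, har, hbp⟩ := hR
  have hfold : (PySem.List.pyRange 0 x 1).foldl (fun q _ => aDstep q) (a.1, a.2.1)
      = aDstep^[x.toNat] (a.1, a.2.1) := by
    rw [foldl_ignore, PySem.List.length_pyRange_one]
    norm_num
  obtain ⟨hiter, hval⟩ := D_iter n' S x.toNat c hv
  have hlen := D_len n' S x.toNat c hv
  have hmv := moveD_eq n' S c x hn hv
  have hstate : (PySem.List.pyRange 0 x 1).foldl (fun q _ => aDstep q) (a.1, a.2.1)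
      = (negrev (fLT (liveL n' S) (dIter n' (liveL n' S) x.toNat c)),
         fGE (liveL n' S) (dIter n' (liveL n' S) x.toNat c)) := by
    rw [hfold, ha1, har, hiter]
  refine ⟨hS, ?_, ?_, ?_, ha2, ?_, ?_, ?_⟩
  · rw [hmv]; exact hval
  · by_cases hx : x > 0 <;> simp [hx, hb1]
  · by_cases hx : x > 0 <;> simp [hx, hb2]
  · rw [hstate, hmv]
  · rw [hstate, hmv]
  · by_cases hx : x > 0
    · rw [if_pos hx]
      show min (b.2.1 + x) ((b.1.length : Int)) = _
      rw [hmv, hbp, hb1, hlen]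
      have hple : (fLT (liveL n' S) c).length ≤ (liveL n' S).length :=
        List.length_filter_le _ _
      omega
    · rw [if_neg hx]
      have h0 : x.toNat = 0 := by omega
      rw [hmv, h0]
      exact hbp

theorem sim_U (n' c : Int) (S : List Int) (a : List Int × List Int × List Int)
    (b : List Int × Int × List Int) (hn : 0 ≤ n') (hR : SimRel n' c S a b) (x : Int) :
    SimRel n' (moveU n' (liveL n' S) c x) S
      (((PySem.List.pyRange 0 x 1).foldl (fun q _ => aUstep q) (a.1, a.2.1)).1,
       ((PySem.List.pyRange 0 x 1).foldl (fun q _ => aUstep q) (a.1, a.2.1)).2, a.2.2)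
      (if x > 0 then (b.1, max (b.2.1 - x) 0, b.2.2) else b) := by
  obtain ⟨hS, hv, hb1, hb2, ha2, ha1, har, hbp⟩ := hR
  have hfold : (PySem.List.pyRange 0 x 1).foldl (fun q _ => aUstep q) (a.1, a.2.1)
      = aUstep^[x.toNat] (a.1, a.2.1) := by
    rw [foldl_ignore, PySem.List.length_pyRange_one]
    norm_num
  obtain ⟨hiter, hval⟩ := U_iter n' S x.toNat c hv
  have hlen := U_len n' S x.toNat c hv
  have hmv := moveU_eq n' S c x hn hv
  have hstate : (PySem.List.pyRange 0 x 1).foldl (fun q _ => aUstep q) (a.1, a.2.1)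
      = (negrev (fLT (liveL n' S) (uIter (liveL n' S) x.toNat c)),
         fGE (liveL n' S) (uIter (liveL n' S) x.toNat c)) := by
    rw [hfold, ha1, har, hiter]
  refine ⟨hS, ?_, ?_, ?_, ha2, ?_, ?_, ?_⟩
  · rw [hmv]; exact hval
  · by_cases hx : x > 0 <;> simp [hx, hb1]
  · by_cases hx : x > 0 <;> simp [hx, hb2]
  · rw [hstate, hmv]
  · rw [hstate, hmv]
  · by_cases hx : x > 0
    · rw [if_pos hx]
      show max (b.2.1 - x) 0 = _
      rw [hmv, hbp, hlen]
      omega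
    · rw [if_neg hx]
      have h0 : x.toNat = 0 := by omega
      rw [hmv, h0]
      exact hbp

theorem sim_C (n' c c' : Int) (S : List Int) (a : List Int × List Int × List Int)
    (b : List Int × Int × List Int) (hn : 0 ≤ n') (hR : SimRel n' c S a b)
    (hcn : c ≠ n') (hlen2 : 2 ≤ (liveL n' S).length)
    (hc' : (match fGT (liveL n' S) c with
            | j :: _ => j
            | [] => ((upv (liveL n' S) c).getD n')) = c') :
    SimRel n' c' (S ++ [c]) (aStep a "C") (bStep b "C") := by
  obtain ⟨hS, hv, hb1, hb2, ha2, ha1, har, hbp⟩ := hR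
  have hp := liveL_pairwise n' S
  have hc : c ∈ liveL n' S := by
    rcases hv with h | h
    · exact h
    · exact absurd h hcn
  have hcb := (mem_liveL n' S c).mp hc
  have hdec := live_decomp (liveL n' S) c hp hc
  have hplt := fLT_length_lt (liveL n' S) c hp hc
  have hgecons := filter_ge_cons (liveL n' S) c hp hc
  -- the new live list
  have hlive' : liveL n' (S ++ [c]) = fLT (liveL n' S) c ++ fGT (liveL n' S) c := by
    apply List.SortedLT.eq_of_mem_iff (List.Pairwise.sortedLT (liveL_pairwise n' (S ++ [c])))
      (List.Pairwise.sortedLT ?_)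
    · intro y
      rw [mem_liveL]
      constructor
      · rintro ⟨hy0, hy1, hy2⟩
        simp only [List.mem_append, List.mem_singleton, not_or] at hy2
        have hylive : y ∈ liveL n' S := (mem_liveL n' S y).mpr ⟨hy0, hy1, hy2.1⟩
        rw [hdec] at hylive
        rcases List.mem_append.mp hylive with h | h
        · exact List.mem_append_left _ h
        · rcases List.mem_cons.mp h with h | h
          · exact absurd h hy2.2
          · exact List.mem_append_right _ h
      · intro hy
        have hylive : y ∈ liveL n' S := by
          rcases List.mem_append.mp hy with h | h
          · exact List.mem_of_mem_filter h
          · exact List.mem_of_mem_filter h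
        have hyb := (mem_liveL n' S y).mp hylive
        have hyc : y ≠ c := by
          rcases List.mem_append.mp hy with h | h
          · have := List.of_mem_filter h; simp at this; omega
          · have := List.of_mem_filter h; simp at this; omega
        refine ⟨hyb.1, hyb.2.1, ?_⟩
        simp only [List.mem_append, List.mem_singleton, not_or]
        exact ⟨hyb.2.2, hyc⟩
    · have hsub : List.Sublist (fLT (liveL n' S) c ++ fGT (liveL n' S) c) (liveL n' S) := by
        conv_rhs => rw [hdec]
        exact (List.sublist_cons_self c _).append_left _
      exact hp.sublist hsub
  have hSnew : (S ++ [c]).Nodup ∧ ∀ z ∈ S ++ [c], 0 ≤ z ∧ z < n' := by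
    constructor
    · rw [List.nodup_append]
      refine ⟨hS.1, List.nodup_singleton _, ?_⟩
      intro y hyS
      simp only [List.mem_singleton, forall_eq]
      intro h
      subst h
      exact hcb.2.2 hyS
    · intro z hz
      rcases List.mem_append.mp hz with h | h
      · exact hS.2 z h
      · rw [List.mem_singleton] at h; subst h; exact ⟨hcb.1, hcb.2.1⟩
  -- B pops the cursor row
  have hpop' : PySem.List.pop? b.1 b.2.1
      = some (c, fLT (liveL n' S) c ++ fGT (liveL n' S) c) := by
    rw [hb1, hbp, PySem.List.pop?_natCast _ _ hplt]
    have hget : (liveL n' S)[(fLT (liveL n' S) c).length] = c := by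
      have h1 := cursor_getElem? (liveL n' S) c hp hc
      rw [List.getElem?_eq_getElem hplt] at h1
      exact Option.some.inj h1
    rw [hget]
    have key : ∀ (l1 l2 : List Int), (l1 ++ c :: l2).eraseIdx l1.length = l1 ++ l2 := by
      intro l1 l2
      rw [List.eraseIdx_append_of_length_le (le_refl _)]
      simp
    have herase : (liveL n' S).eraseIdx (fLT (liveL n' S) c).length
        = fLT (liveL n' S) c ++ fGT (liveL n' S) c := by
      calc (liveL n' S).eraseIdx (fLT (liveL n' S) c).length
          = (fLT (liveL n' S) c ++ c :: fGT (liveL n' S) c).eraseIdx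
              (fLT (liveL n' S) c).length := by rw [← hdec]
        _ = _ := key _ _
    rw [herase]
  have hlen_eq : (liveL n' S).length
      = (fLT (liveL n' S) c).length + 1 + (fGT (liveL n' S) c).length := by
    conv_lhs => rw [hdec]
    simp
    omega
  rcases h3 : fGT (liveL n' S) c with _ | ⟨j, tl⟩
  · -- cursor was on the last surviving row: it moves up
    have hfne : fLT (liveL n' S) c ≠ [] := by
      intro h
      rw [hlen_eq, h, h3] at hlen2
      simp at hlen2
    rcases List.eq_nil_or_concat (fLT (liveL n' S) c) with h4 | ⟨g, m, h4⟩
    · exact absurd h4 hfne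
    rw [List.concat_eq_append] at h4
    have hupv : upv (liveL n' S) c = some m := by
      have h4' : (liveL n' S).filter (fun j => decide (j < c)) = g ++ [m] := h4
      rw [upv, h4', List.getLast?_concat]
    have hcm : c' = m := by
      rw [← hc', h3]
      show (upv (liveL n' S) c).getD n' = m
      rw [hupv]
      rfl
    rw [hcm]
    have haC : aStep a "C" = ((hpop a.1).2, hpush [] (-(hpop a.1).1), S ++ [c]) := by
      rw [aStep.eq_def, if_neg (by decide), if_pos rfl, har, hgecons, h3, ha2]
      rfl
    have hfne' : fLT (liveL n' S) c ++ ([] : List Int) ≠ [] := by simpa using hfne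
    have hbC : bStep b "C" = (fLT (liveL n' S) c ++ [], b.2.1 - 1, S ++ [c]) := by
      rw [bStep.eq_def, if_neg (by decide), if_pos rfl, hpop', h3, hb2]
      have hcnd : b.2.1 = ((fLT (liveL n' S) c ++ ([] : List Int)).length : Int)
          ∧ fLT (liveL n' S) c ++ ([] : List Int) ≠ [] := ⟨by rw [hbp]; simp, hfne'⟩
      dsimp only
      rw [if_pos hcnd]
    have hgm : ∀ y ∈ g, y < m := by
      have hpf : (fLT (liveL n' S) c).Pairwise (· < ·) := List.Pairwise.filter _ hp
      rw [h4, List.pairwise_append] at hpf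
      intro y hy
      exact hpf.2.2 y hy m (List.mem_singleton_self m)
    have hlive'' : liveL n' (S ++ [c]) = g ++ [m] := by
      rw [hlive', h3, h4]; simp
    have hfltm : fLT (liveL n' (S ++ [c])) m = g := by
      rw [fLT, hlive'', List.filter_append]
      have h5 : g.filter (fun y => decide (y < m)) = g :=
        List.filter_eq_self.mpr (fun y hy => by simpa using hgm y hy)
      rw [h5]
      simp
    have hfgem : fGE (liveL n' (S ++ [c])) m = [m] := by
      rw [fGE, hlive'', List.filter_append]
      have h5 : g.filter (fun y => decide (m ≤ y)) = [] :=
        List.filter_eq_nil_iff.mpr (fun y hy => by have := hgm y hy; simp; omega)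
      rw [h5]
      simp
    have hmlive : m ∈ liveL n' (S ++ [c]) := by rw [hlive'']; simp
    have hpopl : hpop a.1 = (-m, negrev g) := by
      rw [ha1, h4]
      simp only [negrev, List.map_append, List.reverse_append]
      rfl
    refine ⟨hSnew, Or.inl hmlive, ?_, ?_, ?_, ?_, ?_, ?_⟩
    · rw [hbC]
      show fLT (liveL n' S) c ++ [] = liveL n' (S ++ [c])
      rw [hlive', h3]
    · rw [hbC]
    · rw [haC]
    · rw [haC]
      show (hpop a.1).2 = _
      rw [hpopl, hfltm]
    · rw [haC]
      show hpush [] (-(hpop a.1).1) = _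
      rw [hpopl, hfgem]
      show hpush [] (- -m) = [m]
      rw [hpush, neg_neg]
      rfl
    · rw [hbC, hbp, hfltm]
      show (_ : Int) - 1 = _
      have : (fLT (liveL n' S) c).length = g.length + 1 := by rw [h4]; simp
      omega
  · -- cursor moves down to the next surviving row
    have hcj' : c' = j := by rw [← hc', h3]
    rw [hcj']
    have haC : aStep a "C" = (a.1, j :: tl, S ++ [c]) := by
      rw [aStep.eq_def, if_neg (by decide), if_pos rfl, har, hgecons, h3, ha2]
      rfl
    have hbC : bStep b "C" = (fLT (liveL n' S) c ++ j :: tl, b.2.1, S ++ [c]) := by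
      rw [bStep.eq_def, if_neg (by decide), if_pos rfl, hpop', h3, hb2]
      have hcnd : ¬ (b.2.1 = ((fLT (liveL n' S) c ++ j :: tl).length : Int)
          ∧ fLT (liveL n' S) c ++ j :: tl ≠ []) := by
        rintro ⟨hcnd, -⟩
        rw [hbp, List.length_append, List.length_cons] at hcnd
        omega
      dsimp only
      rw [if_neg hcnd]
    have hjmem : j ∈ fGT (liveL n' S) c := by rw [h3]; exact List.mem_cons_self
    have hjlive : j ∈ liveL n' S := List.mem_of_mem_filter hjmem
    have hcj : c < j := by have := List.of_mem_filter hjmem; simpa using this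
    have hpf : (fGT (liveL n' S) c).Pairwise (· < ·) := List.Pairwise.filter _ hp
    have hjtl : ∀ y ∈ tl, j < y := by
      rw [h3, List.pairwise_cons] at hpf
      exact hpf.1
    have hlive'' : liveL n' (S ++ [c]) = fLT (liveL n' S) c ++ (j :: tl) := by
      rw [hlive', h3]
    have hfltj : fLT (liveL n' (S ++ [c])) j = fLT (liveL n' S) c := by
      rw [fLT, hlive'', List.filter_append]
      have h5 : (fLT (liveL n' S) c).filter (fun y => decide (y < j)) = fLT (liveL n' S) c :=
        List.filter_eq_self.mpr (fun y hy => by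
          have := List.of_mem_filter hy; simp at this ⊢; omega)
      have h6 : (j :: tl).filter (fun y => decide (y < j)) = [] := by
        rw [List.filter_eq_nil_iff]
        intro y hy
        rcases List.mem_cons.mp hy with rfl | hytl
        · simp
        · have := hjtl y hytl; simp; omega
      rw [h5, h6]
      simp
    have hfgej : fGE (liveL n' (S ++ [c])) j = j :: tl := by
      rw [fGE, hlive'', List.filter_append]
      have h5 : (fLT (liveL n' S) c).filter (fun y => decide (j ≤ y)) = [] := by
        rw [List.filter_eq_nil_iff]
        intro y hy
        have := List.of_mem_filter hy; simp at this ⊢; omega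
      have h6 : (j :: tl).filter (fun y => decide (j ≤ y)) = j :: tl :=
        List.filter_eq_self.mpr (fun y hy => by
          rcases List.mem_cons.mp hy with rfl | hytl
          · simp
          · have := hjtl y hytl; simp; omega)
      rw [h5, h6]
      simp
    have hjlive' : j ∈ liveL n' (S ++ [c]) := by rw [hlive'']; simp
    refine ⟨hSnew, Or.inl hjlive', ?_, ?_, ?_, ?_, ?_, ?_⟩
    · rw [hbC]
      show fLT (liveL n' S) c ++ j :: tl = liveL n' (S ++ [c])
      rw [hlive'']
    · rw [hbC]
    · rw [haC]
    · rw [haC]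
      show a.1 = _
      rw [ha1, hfltj]
    · rw [haC]
      show (j :: tl : List Int) = _
      rw [hfgej]
    · rw [hbC, hbp, hfltj]

theorem sim_Z (n' c : Int) (S : List Int) (a : List Int × List Int × List Int)
    (b : List Int × Int × List Int) (hn : 0 ≤ n') (hR : SimRel n' c S a b)
    (hSne : S ≠ []) (hcn : c ≠ n') :
    SimRel n' c S.dropLast (aStep a "Z") (bStep b "Z") := by
  obtain ⟨hS, hv, hb1, hb2, ha2, ha1, har, hbp⟩ := hR
  have hp := liveL_pairwise n' S
  have hc : c ∈ liveL n' S := by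
    rcases hv with h | h
    · exact h
    · exact absurd h hcn
  have hplt := fLT_length_lt (liveL n' S) c hp hc
  have hgecons := filter_ge_cons (liveL n' S) c hp hc
  have hdlg := List.dropLast_append_getLast hSne
  set z := S.getLast hSne with hzdef
  have hzS : z ∈ S := List.getLast_mem hSne
  have hzb := hS.2 z hzS
  have hznd : z ∉ S.dropLast := by
    intro hmem
    have hnd := hS.1
    rw [← hdlg, List.nodup_append] at hnd
    exact hnd.2.2 z hmem z (List.mem_singleton_self z) rfl
  have hzlive : z ∉ liveL n' S := by
    intro h
    exact ((mem_liveL n' S z).mp h).2.2 hzS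
  have hzc : z ≠ c := fun h => hzlive (h ▸ hc)
  have hpopS : PySem.List.pop? S = some (z, S.dropLast) := by
    conv_lhs => rw [← hdlg]
    exact PySem.List.pop?_last _ _
  have hSnew : S.dropLast.Nodup ∧ ∀ y ∈ S.dropLast, 0 ≤ y ∧ y < n' :=
    ⟨hS.1.sublist (List.dropLast_sublist S),
     fun y hy => hS.2 y ((List.dropLast_sublist S).subset hy)⟩
  have hmemdl : ∀ y, y ∈ liveL n' S.dropLast ↔ y = z ∨ y ∈ liveL n' S := by
    intro y
    rw [mem_liveL, mem_liveL]
    constructor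
    · rintro ⟨hy0, hy1, hy2⟩
      by_cases hyz : y = z
      · exact Or.inl hyz
      · refine Or.inr ⟨hy0, hy1, ?_⟩
        intro hyS
        rw [← hdlg, List.mem_append, List.mem_singleton] at hyS
        rcases hyS with h | h
        · exact hy2 h
        · exact hyz h
    · rintro (rfl | ⟨hy0, hy1, hy2⟩)
      · exact ⟨hzb.1, hzb.2, hznd⟩
      · exact ⟨hy0, hy1, fun h => hy2 ((List.dropLast_sublist S).subset h)⟩
  have hlivenew : liveL n' S.dropLast = List.orderedInsert (· ≤ ·) z (liveL n' S) := by
    symm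
    exact oins_eq z (liveL n' S) (liveL n' S.dropLast) hp (liveL_pairwise n' S.dropLast)
      hzlive hmemdl
  have hclive' : c ∈ liveL n' S.dropLast := (hmemdl c).mpr (Or.inr hc)
  -- A's step
  have haZ : aStep a "Z" =
      (if z < c then (hpush a.1 (-z), a.2.1, S.dropLast)
       else (a.1, hpush a.2.1 z, S.dropLast)) := by
    rw [aStep.eq_def, if_neg (by decide), if_neg (by decide), if_pos rfl, ha2, hpopS]
    dsimp only
    rw [har, hgecons]
  -- B's step
  have hgetc : PySem.List.pyGetD b.1 b.2.1 0 = c := by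
    rw [hb1, hbp, PySem.List.pyGetD_natCast]
    rw [List.getD_eq_getElem _ _ hplt]
    have h1 := cursor_getElem? (liveL n' S) c hp hc
    rw [List.getElem?_eq_getElem hplt] at h1
    exact Option.some.inj h1
  have hnotlen : ¬ (b.2.1 = ((b.1.length : Nat) : Int)) := by
    rw [hb1, hbp]
    intro h
    simp at h
    omega
  have hbZ : bStep b "Z" =
      (List.orderedInsert (· ≤ ·) z b.1,
       (if z < c then b.2.1 + 1 else b.2.1), S.dropLast) := by
    rw [bStep.eq_def, if_neg (by decide), if_neg (by decide), if_pos rfl, hb2, hpopS]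
    dsimp only
    rw [hgetc]
    by_cases hzlt : z < c
    · rw [if_pos (Or.inr hzlt), if_pos hzlt]
    · rw [if_neg (by push_neg; exact ⟨hnotlen, by omega⟩), if_neg hzlt]
  have hcz : z < c ∨ c < z := by omega
  by_cases hzlt : z < c
  · -- restored row is above the cursor
    have hflt' : List.orderedInsert (· ≤ ·) (-z) (negrev (fLT (liveL n' S) c))
        = negrev (fLT (liveL n' S.dropLast) c) := by
      apply oins_eq
      · exact negrev_pairwise _ (List.Pairwise.filter _ hp)
      · exact negrev_pairwise _ (List.Pairwise.filter _ (liveL_pairwise n' S.dropLast))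
      · rw [mem_negrev]
        intro h
        simp only [neg_neg] at h
        exact hzlive (List.mem_of_mem_filter h)
      · intro y
        rw [mem_negrev, mem_negrev]
        simp only [fLT, List.mem_filter, decide_eq_true_eq]
        rw [hmemdl]
        constructor
        · rintro ⟨(h | h), hlt⟩
          · left; omega
          · right; exact ⟨h, hlt⟩
        · rintro (rfl | ⟨h, hlt⟩)
          · exact ⟨Or.inl (by ring), by simpa using hzlt⟩
          · exact ⟨Or.inr h, hlt⟩
    have hge' : fGE (liveL n' S.dropLast) c = fGE (liveL n' S) c := by
      apply List.SortedLT.eq_of_mem_iff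
        (List.Pairwise.sortedLT (List.Pairwise.filter _ (liveL_pairwise n' S.dropLast)))
        (List.Pairwise.sortedLT (List.Pairwise.filter _ hp))
      intro y
      simp only [fGE, List.mem_filter, decide_eq_true_eq]
      rw [hmemdl]
      constructor
      · rintro ⟨(rfl | h), hge⟩
        · omega
        · exact ⟨h, hge⟩
      · rintro ⟨h, hge⟩
        exact ⟨Or.inr h, hge⟩
    have hlen' : (fLT (liveL n' S.dropLast) c).length = (fLT (liveL n' S) c).length + 1 := by
      have := congrArg List.length hflt'
      rw [List.orderedInsert_length] at this
      simp only [negrev, List.length_reverse, List.length_map] at this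
      omega
    refine ⟨hSnew, Or.inl hclive', ?_, ?_, ?_, ?_, ?_, ?_⟩
    · rw [hbZ, hb1]
      show List.orderedInsert (· ≤ ·) z (liveL n' S) = _
      rw [hlivenew]
    · rw [hbZ]
    · rw [haZ, if_pos hzlt]
    · rw [haZ, if_pos hzlt]
      show hpush a.1 (-z) = _
      rw [hpush, ha1, hflt']
    · rw [haZ, if_pos hzlt]
      show a.2.1 = _
      rw [har, hge']
    · rw [hbZ, if_pos hzlt, hbp, hlen']
      push_cast
      ring
  · -- restored row is below the cursor
    have hclz : c < z := by omega
    have hflt' : fLT (liveL n' S.dropLast) c = fLT (liveL n' S) c := by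
      apply List.SortedLT.eq_of_mem_iff
        (List.Pairwise.sortedLT (List.Pairwise.filter _ (liveL_pairwise n' S.dropLast)))
        (List.Pairwise.sortedLT (List.Pairwise.filter _ hp))
      intro y
      simp only [fLT, List.mem_filter, decide_eq_true_eq]
      rw [hmemdl]
      constructor
      · rintro ⟨(rfl | h), hlt⟩
        · omega
        · exact ⟨h, hlt⟩
      · rintro ⟨h, hlt⟩
        exact ⟨Or.inr h, hlt⟩
    have hge' : List.orderedInsert (· ≤ ·) z (fGE (liveL n' S) c)
        = fGE (liveL n' S.dropLast) c := by
      apply oins_eq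
      · exact List.Pairwise.filter _ hp
      · exact List.Pairwise.filter _ (liveL_pairwise n' S.dropLast)
      · intro h
        exact hzlive (List.mem_of_mem_filter h)
      · intro y
        simp only [fGE, List.mem_filter, decide_eq_true_eq]
        rw [hmemdl]
        constructor
        · rintro ⟨(rfl | h), hge⟩
          · exact Or.inl rfl
          · exact Or.inr ⟨h, hge⟩
        · rintro (rfl | ⟨h, hge⟩)
          · exact ⟨Or.inl rfl, by omega⟩
          · exact ⟨Or.inr h, hge⟩
    refine ⟨hSnew, Or.inl hclive', ?_, ?_, ?_, ?_, ?_, ?_⟩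
    · rw [hbZ, hb1]
      show List.orderedInsert (· ≤ ·) z (liveL n' S) = _
      rw [hlivenew]
    · rw [hbZ]
    · rw [haZ, if_neg hzlt]
    · rw [haZ, if_neg hzlt]
      show a.1 = _
      rw [ha1, hflt']
    · rw [haZ, if_neg hzlt]
      show hpush a.2.1 z = _
      rw [hpush, har, hge']
    · rw [hbZ, if_neg hzlt, hbp, hflt']

theorem foldl_bind_none (n' : Int) :
    ∀ cs : List String,
      cs.foldl (fun o i => o.bind (fun s => mStep n' s i)) none = none := by
  intro cs
  induction cs with
  | nil => rfl
  | cons i cs ih => simpa using ih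

-- the command-step simulation
theorem step_sim (n' : Int) (c : Int) (S : List Int) (c' : Int) (S' : List Int) (i : String)
    (a : List Int × List Int × List Int) (b : List Int × Int × List Int)
    (hn : 0 ≤ n') (hR : SimRel n' c S a b) (hm : mStep n' (c, S) i = some (c', S')) :
    SimRel n' c' S' (aStep a i) (bStep b i) := by
  by_cases hlen : PySem.Str.len i > 1
  · rw [mStep.eq_def] at hm
    dsimp only at hm
    rw [if_pos hlen] at hm
    rcases hsp : PySem.Str.split₀ i with _ | ⟨t0, rest⟩
    · rw [hsp] at hm
      simp at hm
    · rw [hsp] at hm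
      dsimp only at hm
      by_cases ht0 : t0 = "D" ∨ t0 = "U"
      · rw [if_pos ht0] at hm
        rcases rest with _ | ⟨t1, r2⟩
        · simp at hm
        · dsimp only at hm
          rcases hof : PySem.Int.ofStr? t1 with _ | x
          · rw [hof] at hm
            simp at hm
          · rw [hof] at hm
            dsimp only at hm
            rw [Option.some.injEq] at hm
            by_cases htD : t0 = "D"
            · rw [if_pos htD] at hm
              rw [Prod.mk.injEq] at hm
              obtain ⟨h1, h2⟩ := hm
              subst h1
              subst h2
              have haeq : aStep a i =
                  (((PySem.List.pyRange 0 x 1).foldl (fun q _ => aDstep q) (a.1, a.2.1)).1,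
                   ((PySem.List.pyRange 0 x 1).foldl (fun q _ => aDstep q) (a.1, a.2.1)).2,
                   a.2.2) := by
                rw [aStep.eq_def, if_pos hlen, hsp]
                dsimp only
                rw [if_pos htD, hof]
              have hbeq : bStep b i =
                  (if x > 0 then (b.1, min (b.2.1 + x) ((b.1.length : Int)), b.2.2) else b) := by
                rw [bStep.eq_def, if_pos hlen, hsp]
                dsimp only
                rw [if_pos htD, hof]
              rw [haeq, hbeq]
              exact sim_D n' c S a b hn hR x
            · have htU : t0 = "U" := ht0.resolve_left htD
              rw [if_neg htD] at hm
              rw [Prod.mk.injEq] at hm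
              obtain ⟨h1, h2⟩ := hm
              subst h1
              subst h2
              have haeq : aStep a i =
                  (((PySem.List.pyRange 0 x 1).foldl (fun q _ => aUstep q) (a.1, a.2.1)).1,
                   ((PySem.List.pyRange 0 x 1).foldl (fun q _ => aUstep q) (a.1, a.2.1)).2,
                   a.2.2) := by
                rw [aStep.eq_def, if_pos hlen, hsp]
                dsimp only
                rw [if_neg htD, if_pos htU, hof]
              have hbeq : bStep b i =
                  (if x > 0 then (b.1, max (b.2.1 - x) 0, b.2.2) else b) := by
                rw [bStep.eq_def, if_pos hlen, hsp]
                dsimp only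
                rw [if_neg htD, if_pos htU, hof]
              rw [haeq, hbeq]
              exact sim_U n' c S a b hn hR x
      · rw [if_neg ht0] at hm
        rw [Option.some.injEq] at hm
        obtain ⟨h1, h2⟩ := Prod.mk.injEq .. |>.mp hm
        subst h1
        subst h2
        push_neg at ht0
        have haeq : aStep a i = a := by
          rw [aStep.eq_def, if_pos hlen, hsp]
          dsimp only
          rw [if_neg ht0.1, if_neg ht0.2]
        have hbeq : bStep b i = b := by
          rw [bStep.eq_def, if_pos hlen, hsp]
          dsimp only
          rw [if_neg ht0.1, if_neg ht0.2]
        rw [haeq, hbeq]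
        exact hR
  · rw [mStep.eq_def] at hm
    dsimp only at hm
    rw [if_neg hlen] at hm
    by_cases hC : i = "C"
    · rw [if_pos hC] at hm
      by_cases hcond : c = n' ∨ (liveL n' S).length < 2
      · rw [if_pos hcond] at hm
        simp at hm
      · rw [if_neg hcond] at hm
        push_neg at hcond
        rw [Option.some.injEq] at hm
        obtain ⟨h1, h2⟩ := Prod.mk.injEq .. |>.mp hm
        subst h2
        subst hC
        exact sim_C n' c c' S a b hn hR hcond.1 (by omega) h1
    · rw [if_neg hC] at hm
      by_cases hZ : i = "Z"
      · rw [if_pos hZ] at hm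
        by_cases hcond : S = [] ∨ c = n'
        · rw [if_pos hcond] at hm
          simp at hm
        · rw [if_neg hcond] at hm
          push_neg at hcond
          rw [Option.some.injEq] at hm
          obtain ⟨h1, h2⟩ := Prod.mk.injEq .. |>.mp hm
          subst h1
          subst h2
          subst hZ
          exact sim_Z n' c S a b hn hR hcond.1 hcond.2
      · rw [if_neg hZ] at hm
        rw [Option.some.injEq] at hm
        obtain ⟨h1, h2⟩ := Prod.mk.injEq .. |>.mp hm
        subst h1
        subst h2
        have haeq : aStep a i = a := by
          rw [aStep.eq_def, if_neg hlen, if_neg hC, if_neg hZ]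
        have hbeq : bStep b i = b := by
          rw [bStep.eq_def, if_neg hlen, if_neg hC, if_neg hZ]
        rw [haeq, hbeq]
        exact hR

theorem run_sim (n' : Int) (cmds : List String) :
    ∀ (c : Int) (S : List Int) (c' : Int) (S' : List Int)
      (a : List Int × List Int × List Int) (b : List Int × Int × List Int),
      0 ≤ n' → SimRel n' c S a b →
      cmds.foldl (fun o i => o.bind (fun s => mStep n' s i)) (some (c, S)) = some (c', S') →
      SimRel n' c' S' (cmds.foldl aStep a) (cmds.foldl bStep b) := by
  induction cmds with
  | nil =>
    intro c S c' S' a b hn hR hfold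
    rw [List.foldl_nil, Option.some.injEq] at hfold
    obtain ⟨h1, h2⟩ := Prod.mk.injEq .. |>.mp hfold
    subst h1
    subst h2
    exact hR
  | cons i cs ih =>
    intro c S c' S' a b hn hR hfold
    rw [List.foldl_cons] at hfold
    rcases hms : mStep n' (c, S) i with _ | ⟨c2, S2⟩
    · rw [Option.bind_some, hms] at hfold
      rw [foldl_bind_none] at hfold
      cases hfold
    · rw [Option.bind_some, hms] at hfold
      have hR2 := step_sim n' c S c2 S2 i a b hn hR hms
      rw [List.foldl_cons, List.foldl_cons]
      exact ih c2 S2 c' S' (aStep a i) (bStep b i) hn hR2 hfold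

theorem foldl_hpush : ∀ (l acc : List Int), (acc ++ l).Pairwise (· < ·) →
    l.foldl (fun h i => hpush h i) acc = acc ++ l := by
  intro l
  induction l with
  | nil => intro acc _; simp
  | cons x xs ih =>
    intro acc hacc
    have hacc2 := hacc
    rw [List.pairwise_append] at hacc2
    have hpx : hpush acc x = acc ++ [x] := by
      rw [hpush]
      exact oins_back x acc (fun y hy => by
        have := hacc2.2.2 y hy x List.mem_cons_self
        omega)
    have hassoc : acc ++ [x] ++ xs = acc ++ x :: xs := by simp
    rw [List.foldl_cons, hpx, ih (acc ++ [x]) (by rw [hassoc]; exact hacc), hassoc]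

-- the unguarded k-loop of A agrees with the guarded D-step as long as rows remain
theorem kstep_iter (n' : Int) (S : List Int) :
    ∀ (m : Nat) (c : Int), Valid n' (liveL n' S) c → m ≤ (fGE (liveL n' S) c).length →
      (fun (q : List Int × List Int) => (hpush q.1 (-(hpop q.2).1), (hpop q.2).2))^[m]
          (negrev (fLT (liveL n' S) c), fGE (liveL n' S) c)
        = aDstep^[m] (negrev (fLT (liveL n' S) c), fGE (liveL n' S) c) := by
  intro m
  induction m with
  | zero => intro c _ _; rfl
  | succ m ih =>
    intro c hv hle
    have hc : c ∈ liveL n' S := by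
      rcases hv with h | h
      · exact h
      · exfalso
        rw [h, fGE_sentinel] at hle
        simp at hle
    have hge := filter_ge_cons _ c (liveL_pairwise n' S) hc
    obtain ⟨hstep1, hval, _, hgenew⟩ := D_one n' S c hc
    have hkstep : (hpush (negrev (fLT (liveL n' S) c), fGE (liveL n' S) c).1
          (-(hpop (negrev (fLT (liveL n' S) c), fGE (liveL n' S) c).2).1),
        (hpop (negrev (fLT (liveL n' S) c), fGE (liveL n' S) c).2).2)
        = aDstep (negrev (fLT (liveL n' S) c), fGE (liveL n' S) c) := by
      dsimp only
      rw [hge]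
      rfl
    rw [Function.iterate_succ_apply, Function.iterate_succ_apply, hkstep, hstep1]
    refine ih _ hval ?_
    rw [hgenew]
    have h2 : (fGE (liveL n' S) c).length = (fGT (liveL n' S) c).length + 1 := by
      rw [hge]
      simp
    omega

theorem init_sim (n k : Int) (hk : k ≤ max n 0) :
    SimRel (max n 0) (min (max k 0) (max n 0)) []
      (((PySem.List.pyRange 0 k 1).foldl
          (fun (q : List Int × List Int) _ => let m := hpop q.2; (hpush q.1 (-m.1), m.2))
          (([] : List Int), (PySem.List.pyRange 0 n 1).foldl (fun h i => hpush h i) [])).1,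
       ((PySem.List.pyRange 0 k 1).foldl
          (fun (q : List Int × List Int) _ => let m := hpop q.2; (hpush q.1 (-m.1), m.2))
          (([] : List Int), (PySem.List.pyRange 0 n 1).foldl (fun h i => hpush h i) [])).2,
       ([] : List Int))
      (PySem.List.pyRange 0 n 1, min (max k 0) ((PySem.List.pyRange 0 n 1).length : Int),
       ([] : List Int)) := by
  have hn' : (0 : Int) ≤ max n 0 := le_max_right n 0
  have hfilter : (PySem.List.pyRange 0 (max n 0) 1).filter (fun j => decide (j ∉ ([] : List Int)))
      = PySem.List.pyRange 0 (max n 0) 1 := List.filter_eq_self.mpr (fun j _ => by simp)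
  have hrange : PySem.List.pyRange 0 n 1 = liveL (max n 0) [] := by
    rw [liveL, hfilter]
    by_cases h : n ≤ 0
    · rw [PySem.List.pyRange_one_eq_nil (by omega), PySem.List.pyRange_one_eq_nil (by omega)]
    · have hmax : max n 0 = n := by omega
      rw [hmax]
  have hpw := liveL_pairwise (max n 0) ([] : List Int)
  have hlenlive : (liveL (max n 0) ([] : List Int)).length = n.toNat := by
    rw [← hrange]
    rw [PySem.List.length_pyRange_one]
    omega
  have hright0 : (PySem.List.pyRange 0 n 1).foldl (fun h i => hpush h i) []
      = liveL (max n 0) [] := by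
    rw [foldl_hpush (PySem.List.pyRange 0 n 1) []
      (by simpa using PySem.List.pairwise_lt_pyRange_one 0 n)]
    rw [List.nil_append]
    exact hrange
  have hflt0 : fLT (liveL (max n 0) ([] : List Int)) 0 = [] := by
    rw [fLT, List.filter_eq_nil_iff]
    intro j hj
    have := (mem_liveL _ _ j).mp hj
    simp
    omega
  have hfge0 : fGE (liveL (max n 0) ([] : List Int)) 0 = liveL (max n 0) [] := by
    rw [fGE, List.filter_eq_self]
    intro j hj
    have := (mem_liveL _ _ j).mp hj
    simp
    omega
  have hv0 : Valid (max n 0) (liveL (max n 0) []) 0 := by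
    by_cases h : 0 < max n 0
    · exact Or.inl ((mem_liveL _ _ 0).mpr ⟨le_refl _, h, by simp⟩)
    · exact Or.inr (by omega)
  have hklen : k.toNat ≤ (fGE (liveL (max n 0) ([] : List Int)) 0).length := by
    rw [hfge0, hlenlive]
    omega
  -- A's k-loop
  have hAfold : (PySem.List.pyRange 0 k 1).foldl
      (fun (q : List Int × List Int) _ => let m := hpop q.2; (hpush q.1 (-m.1), m.2))
      (([] : List Int), (PySem.List.pyRange 0 n 1).foldl (fun h i => hpush h i) [])
      = aDstep^[k.toNat] (negrev (fLT (liveL (max n 0) []) 0), fGE (liveL (max n 0) []) 0) := by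
    rw [foldl_ignore, PySem.List.length_pyRange_one]
    have hinit : (([] : List Int), (PySem.List.pyRange 0 n 1).foldl (fun h i => hpush h i) [])
        = (negrev (fLT (liveL (max n 0) []) 0), fGE (liveL (max n 0) []) 0) := by
      rw [hright0, hflt0, hfge0]
      rfl
    rw [hinit]
    have hcap : (k - 0).toNat = k.toNat := by omega
    rw [hcap]
    exact kstep_iter (max n 0) [] k.toNat 0 hv0 hklen
  obtain ⟨hiter, hval⟩ := D_iter (max n 0) [] k.toNat 0 hv0
  have hlen0 := D_len (max n 0) [] k.toNat 0 hv0
  rw [hflt0] at hlen0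
  simp only [List.length_nil, Nat.zero_add] at hlen0
  set cD := dIter (max n 0) (liveL (max n 0) []) k.toNat 0 with hcD
  have hcval : cD = min (max k 0) (max n 0) := by
    rcases hval with hcl | hcn
    · have hlt := fLT_length_lt (liveL (max n 0) []) cD hpw hcl
      have hgel := cursor_getElem? (liveL (max n 0) []) cD hpw hcl
      rw [List.getElem?_eq_getElem hlt] at hgel
      set idx := (fLT (liveL (max n 0) []) cD).length with hidx
      have hidxlt : idx < (PySem.List.pyRange 0 n 1).length := by
        rw [hrange]
        exact hlt
      have hgel2 : (PySem.List.pyRange 0 n 1)[idx]? = some cD := by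
        rw [hrange, List.getElem?_eq_getElem hlt]
        exact hgel
      rw [List.getElem?_eq_getElem hidxlt] at hgel2
      have hval2 := PySem.List.getElem_pyRange_one 0 n idx hidxlt
      have hcd2 : cD = (idx : Int) := by
        rw [← Option.some.inj hgel2, hval2]
        omega
      omega
    · have hfull : (fLT (liveL (max n 0) []) cD).length = (liveL (max n 0) []).length := by
        rw [hcn, fLT_sentinel]
      rw [hcn]
      rw [hfull, hlenlive] at hlen0
      omega
  refine ⟨⟨List.nodup_nil, by simp⟩, ?_, hrange, rfl, rfl, ?_, ?_, ?_⟩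
  · rw [← hcval]
    exact hval
  · rw [← hcval]
    show ((PySem.List.pyRange 0 k 1).foldl
      (fun (q : List Int × List Int) _ => let m := hpop q.2; (hpush q.1 (-m.1), m.2))
      (([] : List Int), (PySem.List.pyRange 0 n 1).foldl (fun h i => hpush h i) [])).1 = _
    rw [hAfold, hiter]
  · rw [← hcval]
    show ((PySem.List.pyRange 0 k 1).foldl
      (fun (q : List Int × List Int) _ => let m := hpop q.2; (hpush q.1 (-m.1), m.2))
      (([] : List Int), (PySem.List.pyRange 0 n 1).foldl (fun h i => hpush h i) [])).2 = _
    rw [hAfold, hiter]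
  · show min (max k 0) ((PySem.List.pyRange 0 n 1).length : Int) = _
    rw [← hcval, hlen0, PySem.List.length_pyRange_one]
    have h2 : (fLT (liveL (max n 0) []) cD).length ≤ (liveL (max n 0) []).length :=
      List.length_filter_le _ _
    rw [hlen0, hlenlive] at h2
    omega

theorem fold_join (l : List Int) (f g : Int → String) (h : ∀ i ∈ l, f i = g i) :
    l.foldl (fun ans i => ans ++ f i) "" = PySem.Str.join "" (l.map g) := by
  have chars_join_nil : ∀ (ls : List (List Char)), PySem.Chars.join [] ls = ls.flatten := by
    intro ls
    induction ls with
    | nil => rfl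
    | cons a t ih =>
      cases t with
      | nil => simp [PySem.Chars.join, List.intercalate, List.intersperse_single]
      | cons b t2 =>
        simp only [PySem.Chars.join, List.intercalate] at ih ⊢
        rw [List.intersperse_cons₂, List.flatten_cons, List.flatten_cons, ih,
          List.flatten_cons]
        simp
  have hB : ∀ (xs : List String),
      (PySem.Str.join "" xs).toList = (xs.map String.toList).flatten := by
    intro xs
    rw [PySem.Str.join]
    rw [String.toList_ofList]
    have hnil : ("" : String).toList = [] := rfl
    rw [hnil, chars_join_nil]
  have hA : ∀ (xs : List Int) (s : String),
      (xs.foldl (fun ans i => ans ++ f i) s).toList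
        = s.toList ++ (xs.map (fun i => (f i).toList)).flatten := by
    intro xs
    induction xs with
    | nil => intro s; simp
    | cons x t ih =>
      intro s
      rw [List.foldl_cons, ih, String.toList_append]
      simp
  rw [← String.toList_inj, hA, hB]
  simp only [String.toList_empty, List.nil_append, List.map_map]
  congr 1
  apply List.map_congr_left
  intro i hi
  rw [Function.comp_apply, h i hi]

theorem finish (n c : Int) (S : List Int) (a : List Int × List Int × List Int)
    (b : List Int × Int × List Int) (hR : SimRel (max n 0) c S a b) :
    (PySem.List.pyRange 0 n 1).foldl
        (fun ans i => ans ++ (if (drainL a.1 ++ drainR a.2.1).contains i then "O" else "X")) ""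
      = PySem.Str.join ""
          ((PySem.List.pyRange 0 n 1).map
            (fun i => if (PySem.Set.ofList b.2.2).contains i then "X" else "O")) := by
  obtain ⟨hS, hv, hb1, hb2, ha2, ha1, har, hbp⟩ := hR
  apply fold_join
  intro i hi
  have hmem := (PySem.List.mem_pyRange_one).mp hi
  have hresult : drainL a.1 ++ drainR a.2.1
      = (fLT (liveL (max n 0) S) c).reverse ++ fGE (liveL (max n 0) S) c := by
    rw [ha1, har, drainL_eq, drainR_eq]
    congr 1
    simp [negrev, List.map_reverse, List.map_map, Function.comp_def]
  have hlivemem : i ∈ liveL (max n 0) S ↔ i ∉ S := by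
    rw [mem_liveL]
    constructor
    · rintro ⟨-, -, h⟩; exact h
    · intro h
      refine ⟨by omega, by omega, h⟩
  have hcontains : (drainL a.1 ++ drainR a.2.1).contains i = true ↔ i ∈ liveL (max n 0) S := by
    rw [hresult, List.contains_iff_mem, List.mem_append, List.mem_reverse]
    constructor
    · rintro (h | h) <;> exact List.mem_of_mem_filter h
    · intro h
      by_cases hic : i < c
      · exact Or.inl (List.mem_filter.mpr ⟨h, by simpa using hic⟩)
      · exact Or.inr (List.mem_filter.mpr ⟨h, by simp; omega⟩)
  have hdead : (PySem.Set.ofList b.2.2).contains i = true ↔ i ∈ S := by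
    rw [hb2]
    simp [pysem]
  by_cases hiS : i ∈ S
  · rw [if_neg (fun h => (hlivemem.mp (hcontains.mp h)) hiS), if_pos (hdead.mpr hiS)]
  · rw [if_pos (hcontains.mpr (hlivemem.mpr hiS)), if_neg (fun h => hiS (hdead.mp h))]

-- ===== VERDICT (by name: the statement is the Claim_ definition above) =====
theorem solution_spec : Claim_equal_solution := by
  intro n k cmd _ hpre
  obtain ⟨hk, hrun⟩ := hpre
  rw [Spec_solution]
  rcases hfin : mRun n k cmd with _ | ⟨c', S'⟩
  · rw [hfin] at hrun
    simp at hrun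
  · have hinit := init_sim n k hk
    have hRend := run_sim (max n 0) cmd (min (max k 0) (max n 0)) [] c' S' _ _
      (le_max_right n 0) hinit hfin
    exact finish n c' S' _ _ hRend
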